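-- pv_equiv track=rewrite | github.com/remizu23/Okinawa_RF | code/utils_prism.py | extract_stay_segments
-- ===== SOURCE A (Python) =====
-- from typing import List, Dict, Tuple
--
-- def extract_stay_segments(seq: List[int],
--                          stay_offset: int = 19) -> List[Dict]:
--     """
--     滞在セグメントを抽出
--
--     Args:
--         seq: トークン系列
--         stay_offset: 滞在トークンのオフセット
--
--     Returns:
--         segments: [{'node': int, 'start': int, 'length': int}, ...]
--     """
--     segments = []
--     i = 0
--
--     while i < len(seq):
--         token = seq[i]
--
--         # 滞在トークンかチェック
--         if token >= stay_offset and token < stay_offset * 2: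
--             node = token - stay_offset
--             start = i
--             length = 1
--
--             # 連続する同じトークンをカウント
--             j = i + 1
--             while j < len(seq) and seq[j] == token:
--                 length += 1
--                 j += 1
--
--             segments.append({
--                 'node': node,
--                 'start': start,
--                 'length': length
--             })
--
--             i = j
--         else:
--             i += 1
--
--     return segments
-- ===== SOURCE B (Python) =====
-- from typing import List, Dict
--
-- def extract_stay_segments(seq: List[int], stay_offset: int = 19) -> List[Dict]:
--     # Scan right-to-left, one token at a time: each stay token either extends the
--     # most recently built run (the leftmost one so far) or opens a new one.
--     rev = []  # (node, start, length) runs of the processed suffix, most recent last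
--     for i, t in reversed(list(enumerate(seq))):
--         if stay_offset <= t < 2 * stay_offset:
--             if rev and rev[-1][1] == i + 1 and rev[-1][0] == t - stay_offset:
--                 nd, st, ln = rev[-1]
--                 rev[-1] = (nd, i, ln + 1)
--             else:
--                 rev.append((t - stay_offset, i, 1))
--     return [{'node': nd, 'start': st, 'length': ln} for nd, st, ln in reversed(rev)]
-- ===== Notes on version B (the rewrite author's own statement) =====
-- stated objective: alternative
-- what changed: Replaced A's left-to-right scan with an index-jumping inner while-loop that counts each run by a reverse (right-to-left) single pass with no inner loop: every stay token either extends the most recently emitted (leftmost-so-far) segment in place or opens a new one, and the output order falls out of the reversal.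
import Mathlib
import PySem

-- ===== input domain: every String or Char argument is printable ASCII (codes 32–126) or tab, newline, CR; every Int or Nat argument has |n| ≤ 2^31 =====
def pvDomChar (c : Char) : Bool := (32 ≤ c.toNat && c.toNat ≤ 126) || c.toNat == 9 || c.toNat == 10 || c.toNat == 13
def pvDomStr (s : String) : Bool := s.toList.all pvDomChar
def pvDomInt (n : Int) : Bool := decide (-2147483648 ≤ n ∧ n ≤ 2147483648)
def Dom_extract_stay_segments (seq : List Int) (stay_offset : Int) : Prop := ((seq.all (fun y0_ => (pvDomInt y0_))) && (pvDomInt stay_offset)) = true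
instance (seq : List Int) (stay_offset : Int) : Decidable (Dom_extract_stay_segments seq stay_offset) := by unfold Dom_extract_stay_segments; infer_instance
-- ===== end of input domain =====

-- B replaces A's index-jumping scan with an inner run-counting loop by a reverse single pass
-- that extends or opens the leftmost segment built so far (alternative decomposition, same O(n)).

-- ===== PORT A =====
-- inner while loop of A: counts the consecutive tokens equal to `token` and returns the rest
def pvTakeRun (token : Int) : List Int → Int × List Int
  | [] => (0, [])
  | x :: xs =>
    if x = token then
      let p := pvTakeRun token xs
      (p.1 + 1, p.2)
    else (0, x :: xs)

theorem pvTakeRun_len_le (token : Int) (l : List Int) : (pvTakeRun token l).2.length ≤ l.length := by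
  induction l with
  | nil => simp [pvTakeRun]
  | cons x xs ih =>
    simp only [pvTakeRun]
    split
    · simpa using Nat.le_succ_of_le ih
    · simp

-- outer while loop of A: scans the sequence with index i
def pvALoop (off : Int) : List Int → Int → List (List (String × Int))
  | [], _ => []
  | t :: rest, i =>
    if off ≤ t ∧ t < off * 2 then
      let p := pvTakeRun t rest
      [("node", t - off), ("start", i), ("length", 1 + p.1)] :: pvALoop off p.2 (i + (1 + p.1))
    else
      pvALoop off rest (i + 1)
termination_by l _ => l.length
decreasing_by
  · have := pvTakeRun_len_le t rest; simp; omega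
  · simp

def extract_stay_segments (seq : List Int) (stay_offset : Int) : List (List (String × Int)) :=
  pvALoop stay_offset seq 0

-- ===== PORT B =====
-- body of B's reverse for-loop: one stay token either extends the run built last (Python rev[-1])
-- or opens a new one; the append-accumulator `rev` is kept head-first, as usual for Lean folds
def pvBStep (off : Int) (rev : List (Int × Int × Int)) (it : Int × Int) : List (Int × Int × Int) :=
  if off ≤ it.2 ∧ it.2 < 2 * off then
    match rev with
    | (nd, st, ln) :: r =>
        if st = it.1 + 1 ∧ nd = it.2 - off then (nd, it.1, ln + 1) :: r
        else (it.2 - off, it.1, 1) :: (nd, st, ln) :: r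
    | [] => [(it.2 - off, it.1, 1)]
  else rev

def extract_stay_segments_alt (seq : List Int) (stay_offset : Int) : List (List (String × Int)) :=
  -- `rev` is head-first here, so Python's final reversed(rev) is this list in order
  (((PySem.List.enumerate seq 0).reverse).foldl (pvBStep stay_offset) []).map
    (fun s => [("node", s.1), ("start", s.2.1), ("length", s.2.2)])

-- ===== PRECONDITION & SPEC =====
def Spec_extract_stay_segments (seq : List Int) (stay_offset : Int) (out : List (List (String × Int))) : Prop := out = extract_stay_segments_alt seq stay_offset
instance (seq : List Int) (stay_offset : Int) (out : List (List (String × Int))) : Decidable (Spec_extract_stay_segments seq stay_offset out) := by unfold Spec_extract_stay_segments; infer_instance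

-- ===== CLAIM (what is proved, stated in full; the proofs are below) =====
def Claim_equal_extract_stay_segments : Prop := ∀ (seq : List Int) (stay_offset : Int), Dom_extract_stay_segments seq stay_offset → Spec_extract_stay_segments seq stay_offset (extract_stay_segments seq stay_offset)

-- ===== LEMMAS AND PROOFS =====

-- B's reverse foldl as a foldr (right-to-left processing), for the proofs
def pvBGo (off : Int) (l : List (Int × Int)) : List (Int × Int × Int) :=
  l.foldr (fun x y => pvBStep off y x) []

theorem pvBGo_eq (off : Int) (l : List (Int × Int)) :
    (l.reverse).foldl (pvBStep off) [] = pvBGo off l := by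
  simp [pvBGo, List.foldl_reverse]

theorem pvBGo_cons (off : Int) (p : Int × Int) (gs : List (Int × Int)) :
    pvBGo off (p :: gs) = pvBStep off (pvBGo off gs) p := rfl

-- invariant: the head segment of B's result on a suffix starting at j starts at index ≥ j,
-- and starts exactly at j only if its token is the first element of the suffix
theorem pvBGo_head (off : Int) (l : List Int) : ∀ (j : Int) (nd st ln : Int) (r : List (Int × Int × Int)),
    pvBGo off (PySem.List.enumerate l j) = (nd, st, ln) :: r →
    j ≤ st ∧ (st = j → l.head? = some (nd + off)) := by
  induction l with
  | nil => intro j nd st ln r h; simp [pvBGo, PySem.List.enumerate_nil] at h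
  | cons y ys ih =>
    intro j nd st ln r h
    rw [PySem.List.enumerate_cons, pvBGo_cons] at h
    by_cases hstay : off ≤ y ∧ y < 2 * off
    · rcases hg : pvBGo off (PySem.List.enumerate ys (j + 1)) with _ | ⟨⟨nd', st', ln'⟩, r'⟩
      · rw [hg] at h
        simp only [pvBStep, if_pos hstay] at h
        injection h with h1 h2
        injection h1 with e1 e2
        injection e2 with e2 e3
        refine ⟨by omega, fun _ => ?_⟩
        simp [← e1]
      · rw [hg] at h
        simp only [pvBStep, if_pos hstay] at h
        by_cases hm : st' = j + 1 ∧ nd' = y - off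
        · rw [if_pos hm] at h
          injection h with h1 h2
          injection h1 with e1 e2
          injection e2 with e2 e3
          refine ⟨by omega, fun _ => ?_⟩
          simp [← e1, hm.2]
        · rw [if_neg hm] at h
          injection h with h1 h2
          injection h1 with e1 e2
          injection e2 with e2 e3
          refine ⟨by omega, fun _ => ?_⟩
          simp [← e1]
    · rw [show pvBStep off (pvBGo off (PySem.List.enumerate ys (j + 1))) (j, y) = pvBGo off (PySem.List.enumerate ys (j + 1)) from by simp [pvBStep, hstay]] at h
      obtain ⟨h1, _⟩ := ih (j + 1) nd st ln r h
      exact ⟨by omega, fun hsj => by omega⟩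

-- B consumes a whole stay run at once (as seen from the outside)
theorem pvBGo_run (off t : Int) (hstay : off ≤ t ∧ t < 2 * off) :
    ∀ (rest : List Int) (i : Int),
      pvBGo off (PySem.List.enumerate (t :: rest) i) =
        (t - off, i, 1 + (pvTakeRun t rest).1) ::
          pvBGo off (PySem.List.enumerate (pvTakeRun t rest).2 (i + (1 + (pvTakeRun t rest).1))) := by
  intro rest
  induction rest with
  | nil =>
    intro i
    simp [pvBGo, PySem.List.enumerate_cons, PySem.List.enumerate_nil, pvBStep, hstay, pvTakeRun]
  | cons x xs ih =>
    intro i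
    by_cases hx : x = t
    · subst hx
      rw [PySem.List.enumerate_cons, pvBGo_cons, ih (i + 1)]
      have hp1 : (pvTakeRun x (x :: xs)).1 = (pvTakeRun x xs).1 + 1 := by simp [pvTakeRun]
      have hp2 : (pvTakeRun x (x :: xs)).2 = (pvTakeRun x xs).2 := by simp [pvTakeRun]
      rw [hp1, hp2]
      have h2 : i + (1 + ((pvTakeRun x xs).1 + 1)) = i + 1 + (1 + (pvTakeRun x xs).1) := by ring
      rw [h2]
      simp [pvBStep, hstay]
      ring
    · have hp1 : (pvTakeRun t (x :: xs)).1 = 0 := by simp [pvTakeRun, hx]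
      have hp2 : (pvTakeRun t (x :: xs)).2 = x :: xs := by simp [pvTakeRun, hx]
      rw [hp1, hp2, PySem.List.enumerate_cons, pvBGo_cons]
      have h2 : i + (1 + (0 : Int)) = i + 1 := by ring
      rw [h2]
      rcases hg : pvBGo off (PySem.List.enumerate (x :: xs) (i + 1)) with _ | ⟨⟨nd', st', ln'⟩, r'⟩
      · simp [pvBStep, hstay]
      · have hinv := pvBGo_head off (x :: xs) (i + 1) nd' st' ln' r' hg
        have hnomerge : ¬ (st' = i + 1 ∧ nd' = t - off) := by
          rintro ⟨h1, h2⟩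
          have := hinv.2 h1
          simp at this
          subst h2
          omega
        simp only [pvBStep, if_pos hstay, if_neg hnomerge]
        norm_num
-- the two scans agree (strong induction on the length of the remaining list)
theorem pvLoop_eq (off : Int) : ∀ (n : Nat) (l : List Int) (i : Int), l.length ≤ n →
    pvALoop off l i =
      (pvBGo off (PySem.List.enumerate l i)).map
        (fun s => [("node", s.1), ("start", s.2.1), ("length", s.2.2)]) := by
  intro n
  induction n with
  | zero =>
    intro l i hl
    have : l = [] := List.length_eq_zero_iff.mp (Nat.le_zero.mp hl)
    subst this; simp [pvALoop, pvBGo, PySem.List.enumerate_nil]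
  | succ m ih =>
    intro l i hl
    match l with
    | [] => simp [pvALoop, pvBGo, PySem.List.enumerate_nil]
    | t :: rest =>
      have hlen : (pvTakeRun t rest).2.length ≤ m := by
        have := pvTakeRun_len_le t rest
        simp at hl; omega
      by_cases ht : off ≤ t ∧ t < off * 2
      · have ht' : off ≤ t ∧ t < 2 * off := ⟨ht.1, by have := ht.2; omega⟩
        rw [pvBGo_run off t ht' rest i]
        simp only [pvALoop, if_pos ht, List.map_cons]
        rw [ih _ _ hlen]
      · have ht' : ¬ (off ≤ t ∧ t < 2 * off) := by
          intro hc; exact ht ⟨hc.1, by have := hc.2; omega⟩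
        rw [PySem.List.enumerate_cons]
        simp only [pvALoop, if_neg ht]
        rw [pvBGo_cons]
        rw [show pvBStep off (pvBGo off (PySem.List.enumerate rest (i + 1))) (i, t) = pvBGo off (PySem.List.enumerate rest (i + 1)) from by simp [pvBStep, ht']]
        exact ih _ _ (by simp at hl; omega)

-- ===== VERDICT (by name: the statement is the Claim_ definition above) =====
theorem extract_stay_segments_spec : Claim_equal_extract_stay_segments := by
  intro seq off _
  unfold Spec_extract_stay_segments extract_stay_segments extract_stay_segments_alt
  rw [pvBGo_eq]
  exact pvLoop_eq off seq.length seq 0 le_rfl
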